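-- pv_equiv track=rewrite | github.com/mwwoodworth/brainops-ai-agents | optimization/revenue_prompt_optimizer.py | _parse_subject_body
-- ===== SOURCE A (Python) =====
-- def _parse_subject_body(text: str) -> tuple[str | None, str | None]:
--     """
--     Parse a combined email in the format:
--       Subject: ...
--
--       <body>
--     Returns (subject, body). Missing parts return None.
--     """
--     if not isinstance(text, str):
--         return None, None
--     raw = text.replace("\r", "").strip()
--     if not raw:
--         return None, None
--
--     lines = raw.split("\n")
--     first = lines[0].strip()
--     subject = None
--     body_start_idx = 0
--
--     if first.lower().startswith("subject:"):
--         subject = first.split(":", 1)[1].strip()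
--         body_start_idx = 1
--         # Skip blank lines after subject.
--         while body_start_idx < len(lines) and not lines[body_start_idx].strip():
--             body_start_idx += 1
--
--     body = "\n".join(lines[body_start_idx:]).strip() if body_start_idx < len(lines) else ""
--     return (subject or None), (body or None if body else None)
-- ===== SOURCE B (Python) =====
-- def _parse_subject_body(text):
--     if not isinstance(text, str):
--         return None, None
--     raw = text.replace("\r", "").strip()
--     head, _, rest = raw.partition("\n")
--     h = head.strip()
--     if h.lower().startswith("subject:"):
--         return (h[8:].strip() or None), (rest.strip() or None)
--     return None, (raw or None)
-- ===== Notes on version B (the rewrite author's own statement) =====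
-- stated objective: simpler
-- what changed: B replaces A's split-into-lines, blank-line-skipping index loop and newline re-join by a single partition at the first line break plus a strip of the remainder (the final strip makes the blank-skipping loop redundant).
import Mathlib
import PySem

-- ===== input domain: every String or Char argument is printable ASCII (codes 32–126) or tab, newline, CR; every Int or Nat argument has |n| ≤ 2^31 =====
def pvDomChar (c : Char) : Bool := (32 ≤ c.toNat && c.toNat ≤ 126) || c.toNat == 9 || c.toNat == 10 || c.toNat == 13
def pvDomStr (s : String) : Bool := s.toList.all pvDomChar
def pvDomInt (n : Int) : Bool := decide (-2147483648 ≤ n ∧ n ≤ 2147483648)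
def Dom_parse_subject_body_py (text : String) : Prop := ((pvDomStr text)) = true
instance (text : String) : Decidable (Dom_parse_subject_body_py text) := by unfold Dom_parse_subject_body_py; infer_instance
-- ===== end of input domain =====

-- B replaces A's line-splitting, blank-skipping index loop and re-join by one partition at the
-- first newline plus strip (objective: simpler; same asymptotic cost).

-- ===== PORT A =====
-- the 'while body_start_idx < len(lines) and not lines[body_start_idx].strip(): body_start_idx += 1'
-- loop, expressed on the remaining suffix lines[body_start_idx:]
def pvSkipBlanksA : List (List Char) → List (List Char)
  | [] => []
  | l :: t => if PySem.Chars.strip l = [] then pvSkipBlanksA t else l :: t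

def parse_subject_body_py (text : String) : Option String × Option String :=
  let raw := PySem.Chars.strip (PySem.Chars.replace text.toList ['\r'] [])
  if raw = [] then (none, none)
  else
    let lines := PySem.Chars.splitOn raw ['\n']
    -- lines[0]: split always returns a non-empty list, so the index is in range
    let first := PySem.Chars.strip (lines.headD [])
    if PySem.Chars.startswith (PySem.Chars.lower first) "subject:".toList then
      -- first.split(":", 1)[1]: index 1 is in range here because first contains ':'
      let subject := PySem.Chars.strip ((PySem.Chars.splitOnMax first [':'] 1).getD 1 [])
      let bodyLines := pvSkipBlanksA lines.tail
      let body := if bodyLines = [] then [] else PySem.Chars.strip (PySem.Chars.join ['\n'] bodyLines)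
      ((if subject = [] then none else some (String.ofList subject)),
       (if body = [] then none else some (String.ofList body)))
    else
      let body := PySem.Chars.strip (PySem.Chars.join ['\n'] lines)
      (none, if body = [] then none else some (String.ofList body))

-- ===== PORT B =====
-- 'cs or None'
def pvOrNone (cs : List Char) : Option String :=
  if cs = [] then none else some (String.ofList cs)

def parse_subject_body_py_alt (text : String) : Option String × Option String :=
  let raw := PySem.Chars.strip (PySem.Chars.replace text.toList ['\r'] [])
  -- raw.partition("\n"), ported by hand; exact for the single-character separator "\n"
  let head := raw.takeWhile (· != '\n')
  let rest := (raw.dropWhile (· != '\n')).drop 1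
  let h := PySem.Chars.strip head
  if PySem.Chars.startswith (PySem.Chars.lower h) "subject:".toList then
    (pvOrNone (PySem.Chars.strip (h.drop 8)), pvOrNone (PySem.Chars.strip rest))
  else
    (none, pvOrNone raw)

-- ===== PRECONDITION & SPEC =====
def Spec_parse_subject_body_py (text : String) (out : Option String × Option String) : Prop := out = parse_subject_body_py_alt text
instance (text : String) (out : Option String × Option String) : Decidable (Spec_parse_subject_body_py text out) := by unfold Spec_parse_subject_body_py; infer_instance

-- ===== CLAIM (what is proved, stated in full; the proofs are below) =====
def Claim_equal_parse_subject_body_py : Prop := ∀ (text : String), Dom_parse_subject_body_py text → Spec_parse_subject_body_py text (parse_subject_body_py text)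

-- ===== LEMMAS AND PROOFS =====

-- specification of splitting at '\n'
def pvSplitNl (l : List Char) : List (List Char) :=
  if _h : l.dropWhile (· != '\n') = [] then [l.takeWhile (· != '\n')]
  else l.takeWhile (· != '\n') :: pvSplitNl (l.dropWhile (· != '\n')).tail
termination_by l.length
decreasing_by
  have h1 := (List.dropWhile_suffix (l := l) (· != '\n')).length_le
  have h2 : (l.dropWhile (· != '\n')).length ≠ 0 := by simpa using _h
  simp only [List.length_tail]; omega

def pvMapHead (f : List Char → List Char) : List (List Char) → List (List Char)
  | [] => []
  | x :: xs => f x :: xs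

lemma pv_dropWhile_cons_false {p : Char → Bool} {l : List Char} {c : Char} {t : List Char}
    (h : l.dropWhile p = c :: t) : p c = false := by
  induction l with
  | nil => simp at h
  | cons a l ih =>
    rw [List.dropWhile_cons] at h
    split at h
    · exact ih h
    · injection h with h1 _; subst h1; simpa using ‹¬ p a = true›

lemma pvSplitNl_nil : pvSplitNl [] = [[]] := by simp [pvSplitNl]

lemma pvSplitNl_no_nl {l : List Char} (h : l.dropWhile (· != '\n') = []) :
    pvSplitNl l = [l] := by
  rw [pvSplitNl]
  simp only [h, reduceDIte]
  have := List.takeWhile_append_dropWhile (p := (· != '\n')) (l := l)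
  rw [h, List.append_nil] at this
  rw [this]

lemma pvSplitNl_with_nl {l : List Char} {u : List Char}
    (h : l.dropWhile (· != '\n') = '\n' :: u) :
    pvSplitNl l = l.takeWhile (· != '\n') :: pvSplitNl u := by
  rw [pvSplitNl]
  simp [h]

lemma pvSplitNl_ne_nil (l : List Char) : pvSplitNl l ≠ [] := by
  rw [pvSplitNl]; split <;> simp

lemma pvSplitNl_head (l : List Char) : (pvSplitNl l).headD [] = l.takeWhile (· != '\n') := by
  rw [pvSplitNl]; split <;> simp

-- head of a non-empty dropWhile is '\n'
lemma pv_dropWhile_nl {l : List Char} {c : Char} {t : List Char}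
    (h : l.dropWhile (· != '\n') = c :: t) : c = '\n' := by
  have := pv_dropWhile_cons_false h
  simpa using this

lemma pvSplitNl_cons_nl (t : List Char) : pvSplitNl ('\n' :: t) = [] :: pvSplitNl t := by
  rw [pvSplitNl]
  simp

lemma pvSplitNl_cons_other {c : Char} (hc : c ≠ '\n') (t : List Char) :
    pvSplitNl (c :: t) = pvMapHead (c :: ·) (pvSplitNl t) := by
  have hc' : (c != '\n') = true := by simpa using hc
  cases hd : t.dropWhile (· != '\n') with
  | nil =>
    have h1 : (c :: t).dropWhile (· != '\n') = [] := by
      simp only [List.dropWhile_cons, hc', if_true]; exact hd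
    rw [pvSplitNl_no_nl h1, pvSplitNl_no_nl hd]
    simp [pvMapHead]
  | cons d u =>
    have hdn : d = '\n' := pv_dropWhile_nl hd
    subst hdn
    have h1 : (c :: t).dropWhile (· != '\n') = '\n' :: u := by
      simp only [List.dropWhile_cons, hc', if_true]; exact hd
    rw [pvSplitNl_with_nl h1, pvSplitNl_with_nl hd]
    simp [pvMapHead, hc']

lemma pv_go_eq (fuel : Nat) : ∀ (l cur : List Char) (acc : List (List Char)), l.length < fuel →
    PySem.Chars.splitOn.go ['\n'] fuel l cur acc
      = acc.reverse ++ pvMapHead (cur.reverse ++ ·) (pvSplitNl l) := by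
  induction fuel with
  | zero => intro l cur acc h; omega
  | succ fuel ih =>
    intro l cur acc h
    rw [PySem.Chars.splitOn.go.eq_def]
    cases l with
    | nil => simp [pvSplitNl_nil, pvMapHead]
    | cons c t =>
      by_cases hc : c = '\n'
      · subst hc
        have hp : List.isPrefixOf ['\n'] ('\n' :: t) = true := by simp [List.isPrefixOf]
        simp only [hp, if_true, List.length_cons, List.length_nil, List.drop_succ_cons,
          List.drop_zero]
        rw [ih t [] (cur.reverse :: acc) (by simp at h; omega)]
        cases hs : pvSplitNl t with
        | nil => exact absurd hs (pvSplitNl_ne_nil t)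
        | cons a s => simp [pvSplitNl_cons_nl, hs, pvMapHead]
      · have hp : List.isPrefixOf ['\n'] (c :: t) = false := by
          simp [List.isPrefixOf]; exact fun hh => absurd hh.symm hc
        simp only [hp, Bool.false_eq_true, if_false]
        rw [ih t (c :: cur) acc (by simp at h; omega)]
        rw [pvSplitNl_cons_other hc]
        cases hs : pvSplitNl t with
        | nil => exact absurd hs (pvSplitNl_ne_nil t)
        | cons a s => simp [pvMapHead]

lemma pv_splitOn_eq (l : List Char) : PySem.Chars.splitOn l ['\n'] = pvSplitNl l := by
  rw [PySem.Chars.splitOn, pv_go_eq (l.length + 1) l [] [] (Nat.lt_succ_self _)]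
  cases hs : pvSplitNl l with
  | nil => exact absurd hs (pvSplitNl_ne_nil l)
  | cons a s => simp [pvMapHead]

lemma pv_goMax0 (fuel : Nat) (l cur : List Char) (acc : List (List Char)) :
    PySem.Chars.splitOnMax.go [':'] fuel 0 l cur acc = acc.reverse ++ [cur.reverse ++ l] := by
  rw [PySem.Chars.splitOnMax.go.eq_def]
  cases fuel <;> cases l <;> simp

lemma pv_goMax1 (fuel : Nat) : ∀ (l cur : List Char) (acc : List (List Char)), l.length < fuel →
    PySem.Chars.splitOnMax.go [':'] fuel 1 l cur acc
      = acc.reverse ++ (if l.dropWhile (· != ':') = [] then [cur.reverse ++ l]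
          else [cur.reverse ++ l.takeWhile (· != ':'), (l.dropWhile (· != ':')).tail]) := by
  induction fuel with
  | zero => intro l cur acc h; omega
  | succ fuel ih =>
    intro l cur acc h
    rw [PySem.Chars.splitOnMax.go.eq_def]
    cases l with
    | nil => simp
    | cons c t =>
      by_cases hc : c = ':'
      · subst hc
        have hp : List.isPrefixOf [':'] (':' :: t) = true := by simp [List.isPrefixOf]
        simp only [hp, if_true, List.length_cons, List.length_nil, List.drop_succ_cons,
          List.drop_zero, Nat.succ_ne_self, reduceIte, Nat.sub_self]
        rw [pv_goMax0 fuel t [] (cur.reverse :: acc)]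
        simp
      · have hc' : (c != ':') = true := by simpa using hc
        have hp : List.isPrefixOf [':'] (c :: t) = false := by
          simp [List.isPrefixOf]; exact fun hh => absurd hh.symm hc
        simp only [hp, Bool.false_eq_true, if_false, Nat.succ_ne_self]
        rw [ih t (c :: cur) acc (by simp at h; omega)]
        simp only [List.dropWhile_cons, List.takeWhile_cons, hc', if_true]
        split <;> simp

lemma pv_splitOnMax1 (l : List Char) :
    PySem.Chars.splitOnMax l [':'] 1
      = (if l.dropWhile (· != ':') = [] then [l]
          else [l.takeWhile (· != ':'), (l.dropWhile (· != ':')).tail]) := by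
  rw [PySem.Chars.splitOnMax]
  have h1 : ¬ ((1 : Int) < 0) := by norm_num
  simp only [h1, reduceIte, Int.toNat_one]
  rw [pv_goMax1 (l.length + 1) l [] [] (Nat.lt_succ_self _)]
  split <;> simp

-- strip facts
lemma pv_lstrip_idem (l : List Char) :
    PySem.Chars.lstrip (PySem.Chars.lstrip l) = PySem.Chars.lstrip l := by
  simp [PySem.Chars.lstrip, List.dropWhile_idempotent]

lemma pv_rstrip_idem (l : List Char) :
    PySem.Chars.rstrip (PySem.Chars.rstrip l) = PySem.Chars.rstrip l := by
  simp [PySem.Chars.rstrip, List.dropWhile_idempotent]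

lemma pv_head_of_lstrip_fix {a : Char} {z : List Char}
    (h : PySem.Chars.lstrip (a :: z) = a :: z) : PySem.Chars.isspace a = false := by
  by_cases hs : PySem.Chars.isspace a = true
  · exfalso
    rw [PySem.Chars.lstrip, List.dropWhile_cons, if_pos hs] at h
    have h1 := congrArg List.length h
    have h2 := List.length_dropWhile_le (p := PySem.Chars.isspace) (l := z)
    simp at h1
    omega
  · simpa using hs

lemma pv_rstrip_prefix (y : List Char) : PySem.Chars.rstrip y <+: y := by
  rw [PySem.Chars.rstrip]
  have hs := List.dropWhile_suffix (l := y.reverse) PySem.Chars.isspace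
  exact List.reverse_suffix.mp (by simpa using hs)

lemma pv_lstrip_rstrip {y : List Char} (hy : PySem.Chars.lstrip y = y) :
    PySem.Chars.lstrip (PySem.Chars.rstrip y) = PySem.Chars.rstrip y := by
  cases hr : PySem.Chars.rstrip y with
  | nil => rfl
  | cons a s =>
    have hpre : PySem.Chars.rstrip y <+: y := pv_rstrip_prefix y
    rw [hr] at hpre
    obtain ⟨r, hrr⟩ := hpre
    have hhead : PySem.Chars.isspace a = false := by
      apply pv_head_of_lstrip_fix (z := s ++ r)
      have : y = a :: (s ++ r) := by rw [← hrr]; simp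
      rw [← this]
      exact hy
    rw [PySem.Chars.lstrip, List.dropWhile_cons, if_neg (by simp [hhead])]

lemma pv_strip_idem (l : List Char) :
    PySem.Chars.strip (PySem.Chars.strip l) = PySem.Chars.strip l := by
  rw [PySem.Chars.strip, PySem.Chars.strip,
    pv_lstrip_rstrip (pv_lstrip_idem l), pv_rstrip_idem]

lemma pv_strip_eq_nil_all {l : List Char} (h : PySem.Chars.strip l = []) :
    ∀ c ∈ l, PySem.Chars.isspace c = true := by
  rw [PySem.Chars.strip, PySem.Chars.rstrip] at h
  have h1 : List.dropWhile PySem.Chars.isspace (PySem.Chars.lstrip l).reverse = [] := by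
    have := congrArg List.reverse h
    simpa using this
  have h2 : ∀ c ∈ (PySem.Chars.lstrip l), PySem.Chars.isspace c = true := by
    intro c hc
    exact List.dropWhile_eq_nil_iff.mp h1 c (by simpa using hc)
  intro c hc
  rw [← List.takeWhile_append_dropWhile (p := PySem.Chars.isspace) (l := l)] at hc
  rcases List.mem_append.mp hc with h3 | h3
  · exact List.mem_takeWhile_imp h3
  · exact h2 c h3

lemma pv_strip_ws_append {ws l : List Char} (h : ∀ c ∈ ws, PySem.Chars.isspace c = true) :
    PySem.Chars.strip (ws ++ l) = PySem.Chars.strip l := by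
  rw [PySem.Chars.strip, PySem.Chars.strip, PySem.Chars.lstrip, PySem.Chars.lstrip,
    List.dropWhile_append, List.dropWhile_eq_nil_iff.mpr h]
  simp

-- '\n'.join(split(raw)) = raw
lemma pv_join_splitNl (l : List Char) : PySem.Chars.join ['\n'] (pvSplitNl l) = l := by
  induction l using pvSplitNl.induct with
  | case1 l h =>
    rw [pvSplitNl_no_nl h, PySem.Chars.join_singleton]
  | case2 l h ih =>
    cases hd : l.dropWhile (· != '\n') with
    | nil => exact absurd hd h
    | cons d u =>
      have hdn := pv_dropWhile_nl hd; subst hdn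
      rw [hd] at ih
      simp only [List.tail_cons] at ih
      rw [pvSplitNl_with_nl hd]
      cases hs : pvSplitNl u with
      | nil => exact absurd hs (pvSplitNl_ne_nil u)
      | cons a s =>
        rw [PySem.Chars.join_cons_cons, ← hs, ih]
        have := List.takeWhile_append_dropWhile (p := (· != '\n')) (l := l)
        rw [hd] at this
        conv_rhs => rw [← this]
        simp

-- the skip-blank-lines loop followed by join-and-strip equals stripping the raw tail
lemma pv_body (t : List Char) :
    (if pvSkipBlanksA (pvSplitNl t) = [] then []
     else PySem.Chars.strip (PySem.Chars.join ['\n'] (pvSkipBlanksA (pvSplitNl t))))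
      = PySem.Chars.strip t := by
  induction t using pvSplitNl.induct with
  | case1 t h =>
    rw [pvSplitNl_no_nl h]
    by_cases hb : PySem.Chars.strip t = []
    · simp [pvSkipBlanksA, hb]
    · simp only [pvSkipBlanksA, hb, reduceIte]
      simp [PySem.Chars.join_singleton]
  | case2 t h ih =>
    cases hd : t.dropWhile (· != '\n') with
    | nil => exact absurd hd h
    | cons d u =>
      have hdn := pv_dropWhile_nl hd; subst hdn
      rw [hd] at ih
      simp only [List.tail_cons] at ih
      rw [pvSplitNl_with_nl hd]
      by_cases hb : PySem.Chars.strip (t.takeWhile (· != '\n')) = []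
      · simp only [pvSkipBlanksA, hb, reduceIte]
        rw [ih]
        have hts : t = (t.takeWhile (· != '\n') ++ ['\n']) ++ u := by
          have := List.takeWhile_append_dropWhile (p := (· != '\n')) (l := t)
          rw [hd] at this
          conv_lhs => rw [← this]
          simp
        rw [hts, pv_strip_ws_append]
        intro c hc
        rcases List.mem_append.mp hc with h3 | h3
        · exact pv_strip_eq_nil_all hb c h3
        · simp at h3; subst h3; decide
      · simp only [pvSkipBlanksA, hb, reduceIte]
        have hcons : (t.takeWhile (· != '\n') :: pvSplitNl u) = pvSplitNl t := by
          rw [pvSplitNl_with_nl hd]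
        simp only [hcons]
        rw [pv_join_splitNl]
        simp [pvSplitNl_ne_nil]

-- lowerChar inversion at ':'
lemma pv_lower_colon {x : Char} (h : PySem.Chars.lowerChar x = ':') : x = ':' := by
  rw [PySem.Chars.lowerChar] at h
  by_cases hu : PySem.Chars.isupper x = true
  · exfalso
    rw [if_pos hu] at h
    have hb : 65 ≤ x.toNat ∧ x.toNat ≤ 90 := by
      simp [PySem.Chars.isupper, Char.le_def] at hu
      exact hu
    have h58 := congrArg Char.toNat h
    rw [Char.toNat_ofNat] at h58
    have hv : (x.toNat + 32).isValidChar := by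
      constructor
      omega
    rw [if_pos hv] at h58
    have : Char.toNat ':' = 58 := by decide
    omega
  · rw [if_neg hu] at h
    exact h

lemma pv_lower_ne_colon {x d : Char} (h : PySem.Chars.lowerChar x = d) (hd : d ≠ ':') :
    x ≠ ':' := by
  rintro rfl
  exact hd (by rw [← h]; decide)

-- subject extraction: split(":", 1)[1] = drop 8, under the startswith "subject:" guard
lemma pv_subject_eq {first : List Char}
    (h : PySem.Chars.startswith (PySem.Chars.lower first) "subject:".toList = true) :
    (PySem.Chars.splitOnMax first [':'] 1).getD 1 [] = first.drop 8 := by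
  obtain ⟨r, hr⟩ := (PySem.Chars.startswith_iff _ _).mp h
  rw [PySem.Chars.lower] at hr
  have hsl : "subject:".toList = ['s', 'u', 'b', 'j', 'e', 'c', 't', ':'] := rfl
  rw [hsl] at hr
  simp only [List.cons_append, List.nil_append] at hr
  have hr := hr.symm
  obtain ⟨x0, l0, rfl, h0, hr⟩ := List.map_eq_cons_iff.mp hr
  obtain ⟨x1, l1, rfl, h1, hr⟩ := List.map_eq_cons_iff.mp hr
  obtain ⟨x2, l2, rfl, h2, hr⟩ := List.map_eq_cons_iff.mp hr
  obtain ⟨x3, l3, rfl, h3, hr⟩ := List.map_eq_cons_iff.mp hr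
  obtain ⟨x4, l4, rfl, h4, hr⟩ := List.map_eq_cons_iff.mp hr
  obtain ⟨x5, l5, rfl, h5, hr⟩ := List.map_eq_cons_iff.mp hr
  obtain ⟨x6, l6, rfl, h6, hr⟩ := List.map_eq_cons_iff.mp hr
  obtain ⟨x7, l7, rfl, h7, hr⟩ := List.map_eq_cons_iff.mp hr
  have hx7 : x7 = ':' := pv_lower_colon h7
  subst hx7
  have hb0 : (x0 != ':') = true := by simpa using pv_lower_ne_colon h0 (by decide)
  have hb1 : (x1 != ':') = true := by simpa using pv_lower_ne_colon h1 (by decide)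
  have hb2 : (x2 != ':') = true := by simpa using pv_lower_ne_colon h2 (by decide)
  have hb3 : (x3 != ':') = true := by simpa using pv_lower_ne_colon h3 (by decide)
  have hb4 : (x4 != ':') = true := by simpa using pv_lower_ne_colon h4 (by decide)
  have hb5 : (x5 != ':') = true := by simpa using pv_lower_ne_colon h5 (by decide)
  have hb6 : (x6 != ':') = true := by simpa using pv_lower_ne_colon h6 (by decide)
  rw [pv_splitOnMax1]
  simp [hb0, hb1, hb2, hb3, hb4, hb5, hb6]

-- ===== VERDICT (by name: the statement is the Claim_ definition above) =====
theorem parse_subject_body_py_spec : Claim_equal_parse_subject_body_py := by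
  intro text _
  unfold Spec_parse_subject_body_py
  show parse_subject_body_py text = parse_subject_body_py_alt text
  simp only [parse_subject_body_py, parse_subject_body_py_alt]
  set raw := PySem.Chars.strip (PySem.Chars.replace text.toList ['\r'] []) with hraw_def
  have hraw : PySem.Chars.strip raw = raw := by rw [hraw_def]; exact pv_strip_idem _
  clear_value raw
  by_cases hr : raw = []
  · subst hr
    decide
  · rw [if_neg hr, pv_splitOn_eq]
    have hhead : (pvSplitNl raw).headD [] = raw.takeWhile (· != '\n') := pvSplitNl_head raw
    rw [hhead]
    by_cases hsw : PySem.Chars.startswith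
        (PySem.Chars.lower (PySem.Chars.strip (raw.takeWhile (· != '\n'))))
        "subject:".toList = true
    · rw [if_pos hsw, if_pos hsw, pv_subject_eq hsw]
      -- body sides
      cases hd : raw.dropWhile (· != '\n') with
      | nil =>
        rw [pvSplitNl_no_nl hd]
        simp [pvSkipBlanksA, pvOrNone, PySem.Chars.strip, PySem.Chars.lstrip, PySem.Chars.rstrip]
      | cons d u =>
        have hdn := pv_dropWhile_nl hd; subst hdn
        rw [pvSplitNl_with_nl hd]
        simp only [List.tail_cons, List.drop_succ_cons, List.drop_zero]
        rw [pv_body u]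
        simp [pvOrNone]
    · rw [if_neg hsw, if_neg hsw, pv_join_splitNl, hraw]
      simp [pvOrNone, hr]
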